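-- pv_equiv track=rewrite | github.com/rynecjohnston/petrosim | petrosim/results/plotter.py | isotopize
-- ===== SOURCE A (Python) =====
-- def isotopize(string):
--     """
--     Correct string to display isotopes properly.
--
--     :param string: The string to format
--     :type string: str
--
--     :return: The formatted string
--     :rtype: str
--     """
--
--     isotope = ''
--     atom_wt = ''
--     elem = ''
--     for s in string:
--         if s.isdigit():
--             isotope += rf'$^{s}$'
--         else:
--             isotope += s
--     return isotope
-- ===== SOURCE B (Python) =====
-- # B: ten staged whole-string replace passes, one per digit, instead of A's single
-- # per-character loop with an accumulator. Correct because the replacement text for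
-- # digit d ('$^d$') contains only d itself, which is never re-matched by later passes.
-- def isotopize(string):
--     for d in '0123456789':
--         string = string.replace(d, '$^' + d + '$')
--     return string
-- ===== Notes on version B (the rewrite author's own statement) =====
-- stated objective: faster
-- what changed: Replaced A's single per-character scan with quadratic string-concatenation accumulator by ten staged whole-string str.replace passes, one per digit; correct because each pass's replacement text reintroduces only the digit already processed.
import Mathlib
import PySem

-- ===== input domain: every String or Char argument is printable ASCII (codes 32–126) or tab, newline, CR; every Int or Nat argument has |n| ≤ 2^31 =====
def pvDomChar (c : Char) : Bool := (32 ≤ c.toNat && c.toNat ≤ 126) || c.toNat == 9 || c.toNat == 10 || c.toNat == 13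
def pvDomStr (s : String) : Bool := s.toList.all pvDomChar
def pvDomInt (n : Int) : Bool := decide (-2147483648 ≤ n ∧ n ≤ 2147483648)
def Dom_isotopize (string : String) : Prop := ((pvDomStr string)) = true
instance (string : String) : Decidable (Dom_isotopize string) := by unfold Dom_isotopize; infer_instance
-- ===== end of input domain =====

-- B replaces A's single per-character scan with an accumulator by ten staged
-- whole-string replace passes, one per digit (alternative decomposition).

-- ===== PORT A =====
def isotopize (string : String) : String :=
  string.toList.foldl
    (fun isotope s =>
      if PySem.Chars.isdigit s then
        isotope ++ "$^" ++ String.singleton s ++ "$"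
      else
        isotope ++ String.singleton s)
    ""

-- ===== PORT B =====
-- for d in '0123456789': string = string.replace(d, '$^' + d + '$')
def isotopize_alt (string : String) : String :=
  "0123456789".toList.foldl
    (fun s d => PySem.Str.replace s (String.singleton d) ("$^" ++ String.singleton d ++ "$"))
    string

-- ===== PRECONDITION & SPEC =====
def Spec_isotopize (string : String) (out : String) : Prop := out = isotopize_alt string
instance (string : String) (out : String) : Decidable (Spec_isotopize string out) := by unfold Spec_isotopize; infer_instance

-- ===== CLAIM (what is proved, stated in full; the proofs are below) =====
def Claim_equal_isotopize : Prop := ∀ (string : String), Dom_isotopize string → Spec_isotopize string (isotopize string)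

-- ===== LEMMAS AND PROOFS =====

-- single-character replace is a per-character flatMap
lemma replace_single (d : Char) (new l : List Char) :
    PySem.Chars.replace l [d] new = l.flatMap (fun c => if c = d then new else [c]) := by
  have go : ∀ (l acc : List Char),
      PySem.Chars.replace.go [d] new l.length l acc
        = acc.reverse ++ l.flatMap (fun c => if c = d then new else [c]) := by
    intro l
    induction l with
    | nil => intro acc; simp [PySem.Chars.replace.go]
    | cons c t ih =>
      intro acc
      simp only [List.length_cons, PySem.Chars.replace.go, List.flatMap_cons]
      by_cases h : d = c
      · subst h
        simp [List.isPrefixOf, ih]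
      · have hp : [d].isPrefixOf (c :: t) = false := by
          simp [List.isPrefixOf, beq_eq_false_iff_ne.mpr h]
        simp only [hp, Bool.false_eq_true, if_false, ih, List.reverse_cons,
          List.append_assoc, List.singleton_append]
        rw [if_neg (fun hc : c = d => h hc.symm)]
        simp
  simp [PySem.Chars.replace, List.isEmpty, go]

-- one staged pass at the character-list level
def stage (d : Char) (l : List Char) : List Char :=
  l.flatMap (fun c => if c = d then ['$', '^', d, '$'] else [c])

-- the whole staged pipeline
def stagedAll (l : List Char) : List Char :=
  ("0123456789".toList).foldl (fun s d => stage d s) l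

lemma stagedAll_append (l1 l2 : List Char) :
    stagedAll (l1 ++ l2) = stagedAll l1 ++ stagedAll l2 := by
  unfold stagedAll
  generalize "0123456789".toList = ds
  induction ds generalizing l1 l2 with
  | nil => simp
  | cons d t ih => simp only [List.foldl_cons, stage, List.flatMap_append]; exact ih _ _

lemma stagedAll_flatMap (l : List Char) :
    stagedAll l = l.flatMap (fun c => stagedAll [c]) := by
  induction l with
  | nil => rfl
  | cons c t ih =>
    have : (c :: t) = [c] ++ t := rfl
    rw [this, stagedAll_append, ih]
    simp

-- per-character value of the pipeline = A's branch
lemma stagedAll_char (c : Char) :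
    stagedAll [c] = (if PySem.Chars.isdigit c then ['$', '^', c, '$'] else [c]) := by
  by_cases h : PySem.Chars.isdigit c = true
  · rw [if_pos h]
    simp only [PySem.Chars.isdigit, Bool.and_eq_true, decide_eq_true_eq] at h
    obtain ⟨h1, h2⟩ := h
    rw [Char.le_def, UInt32.le_iff_toNat_le] at h1 h2
    have hb1 : 48 ≤ c.toNat := h1
    have hb2 : c.toNat ≤ 57 := h2
    have hofNat := Char.ofNat_toNat c
    interval_cases hn : c.toNat <;> (rw [← hofNat]; decide)
  · rw [if_neg h]
    have hne : ∀ d : Char, PySem.Chars.isdigit d = true → c ≠ d := by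
      intro d hd hcd; rw [hcd] at h; exact h hd
    have h0 := hne '0' (by decide); have h1 := hne '1' (by decide)
    have h2 := hne '2' (by decide); have h3 := hne '3' (by decide)
    have h4 := hne '4' (by decide); have h5 := hne '5' (by decide)
    have h6 := hne '6' (by decide); have h7 := hne '7' (by decide)
    have h8 := hne '8' (by decide); have h9 := hne '9' (by decide)
    simp [stagedAll, stage, if_neg h0, if_neg h1, if_neg h2, if_neg h3, if_neg h4,
      if_neg h5, if_neg h6, if_neg h7, if_neg h8, if_neg h9]

-- B's fold of Str.replace, seen on character lists, is the staged pipeline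
lemma alt_toList (s : String) : (isotopize_alt s).toList = stagedAll s.toList := by
  unfold isotopize_alt stagedAll
  generalize "0123456789".toList = ds
  induction ds generalizing s with
  | nil => rfl
  | cons d t ih =>
    simp only [List.foldl_cons]
    rw [ih]
    congr 1
    rw [PySem.Str.toList_replace]
    simp only [String.toList_append, String.toList_singleton]
    rw [replace_single]
    rfl

-- A's fold at the character-list level
lemma a_toList (l : List Char) (acc : String) :
    (l.foldl
      (fun isotope s =>
        if PySem.Chars.isdigit s then
          isotope ++ "$^" ++ String.singleton s ++ "$"
        else
          isotope ++ String.singleton s)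
      acc).toList
      = acc.toList ++ l.flatMap
          (fun c => if PySem.Chars.isdigit c then ['$', '^', c, '$'] else [c]) := by
  induction l generalizing acc with
  | nil => simp
  | cons c rest ih =>
    simp only [List.foldl_cons, List.flatMap_cons, ih]
    by_cases h : PySem.Chars.isdigit c = true <;> simp [h, String.toList_append]

-- ===== VERDICT (by name: the statement is the Claim_ definition above) =====
theorem isotopize_spec : Claim_equal_isotopize := by
  intro s _
  unfold Spec_isotopize isotopize
  apply String.toList_inj.mp
  rw [a_toList, alt_toList, stagedAll_flatMap]
  simp [stagedAll_char]
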